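-- pv_equiv track=rewrite | github.com/StarsExpress/LeetCode-Repository | two_pointers/tuple_product.py | count_same_product_tuples
-- ===== SOURCE A (Python) =====
-- def count_same_product_tuples(integers: list[int]):  # LeetCode Q.1726.
--     integers = list(set(integers))  # Only consider unique ints.
--     ints_count = len(integers)
--     if ints_count < 4:
--         return 0
--
--     # For each unique product, track all tuples achieving it.
--     products, current_product = dict(), 0
--     start_idx, end_idx = 0, 1
--     while True:
--         if end_idx >= ints_count:
--             if start_idx >= end_idx - 1:
--                 break
--
--             start_idx += 1
--             end_idx += start_idx + 1 - end_idx
--             continue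
--
--         current_product += integers[start_idx] * integers[end_idx] - current_product
--         if current_product not in products.keys():
--             products.update({current_product: []})
--
--         products[current_product].append((integers[start_idx], integers[end_idx]))
--         end_idx += 1
--
--     count = 0
--     for product in products.values():
--         product_len = len(product)
--         if product_len == 2:
--             count += 8  # For two tuples each having 2 ints, permutation = 2 * 2 * 2 = 8.
--             continue
--
--         if product_len > 2:
--             # Combination of 2 out of n is n * (n - 1) / 2.
--             # Each combination has multiple of 8. So outer multiple is 8 / 2 = 4
--             count += (product_len - 1) * product_len * 4
--
--     return count
-- ===== SOURCE B (Python) =====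
-- def count_same_product_tuples(integers: list[int]):  # LeetCode Q.1726.
--     uniq = list(set(integers))
--     n = len(uniq)
--     if n < 4:
--         return 0
--
--     # Sort-then-scan instead of hashing: sort the pair products, then a
--     # run-length scan counts 4*r*(r-1) per maximal run of equal products.
--     products = sorted(uniq[i] * uniq[j] for i in range(n) for j in range(i + 1, n))
--     total = 0
--     prev = products[0]
--     run = 1
--     for p in products[1:]:
--         if p == prev:
--             run += 1
--         else:
--             total += 4 * run * (run - 1)
--             prev = p
--             run = 1
--     total += 4 * run * (run - 1)
--     return total
-- ===== Notes on version B (the rewrite author's own statement) =====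
-- stated objective: alternative
-- what changed: Replaces A's hash-bucketing (dict product -> list of tuples, then a second counting pass over the buckets) by sort-then-scan: build the flat list of pair products, sort it, and a single run-length scan adds 4*r*(r-1) per maximal run of equal products; no dict is used at all.
import Mathlib
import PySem

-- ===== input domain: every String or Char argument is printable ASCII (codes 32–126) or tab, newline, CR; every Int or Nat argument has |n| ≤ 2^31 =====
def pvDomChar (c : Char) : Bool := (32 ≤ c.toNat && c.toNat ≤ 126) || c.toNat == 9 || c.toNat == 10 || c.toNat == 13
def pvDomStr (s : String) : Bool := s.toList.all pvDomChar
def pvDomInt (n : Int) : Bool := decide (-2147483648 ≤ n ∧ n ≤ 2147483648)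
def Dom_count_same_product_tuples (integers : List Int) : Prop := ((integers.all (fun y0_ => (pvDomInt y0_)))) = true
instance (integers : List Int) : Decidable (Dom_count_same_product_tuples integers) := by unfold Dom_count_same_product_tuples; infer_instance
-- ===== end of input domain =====

-- B replaces A's hash-bucketing (dict product -> tuple lists, then a counting pass over buckets)
-- by sort-then-scan: sort the flat list of pair products and run-length-scan it, adding
-- 4*r*(r-1) per maximal run of equal products; no dict at all.

-- ===== PORT A =====
-- A's `while True` loop; the Nat argument is only a totality guard (fuel): the top-level
-- call passes a provably sufficient amount, so the port is exact.
def pvLoopA (l : List Int) (n : Int) :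
    Nat → PySem.Dict Int (List (Int × Int)) → Int → Int → Int → PySem.Dict Int (List (Int × Int))
  | 0, d, _, _, _ => d
  | fuel+1, d, cp, s, e =>
    if e ≥ n then
      if s ≥ e - 1 then d
      else pvLoopA l n fuel d cp (s+1) (s+2)
    else
      let cp' := cp + (PySem.List.pyGetD l s 0 * PySem.List.pyGetD l e 0 - cp)
      let d1 := if d.contains cp' then d else d.insert cp' []
      let d2 := d1.modify cp' [] (· ++ [(PySem.List.pyGetD l s 0, PySem.List.pyGetD l e 0)])
      pvLoopA l n fuel d2 cp' s (e+1)

def count_same_product_tuples (integers : List Int) : Int :=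
  let integers' : List Int := PySem.Set.ofList integers
  let ints_count : Int := (integers'.length : Int)
  if ints_count < 4 then 0
  else
    let products := pvLoopA integers' ints_count
      (integers'.length * (integers'.length + 2)) PySem.Dict.empty 0 0 1
    products.values.foldl (fun count product =>
      if product.length = 2 then count + 8
      else if product.length > 2 then count + ((product.length : Int) - 1) * (product.length : Int) * 4
      else count) 0

-- ===== PORT B =====
-- state of the scan loop: (total, prev, run)
def count_same_product_tuples_alt (integers : List Int) : Int :=
  let uniq : List Int := PySem.Set.ofList integers
  let n : Int := (uniq.length : Int)
  if n < 4 then 0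
  else
    let products : List Int := PySem.List.sorted
      ((PySem.List.pyRange 0 n 1).flatMap (fun i =>
        (PySem.List.pyRange (i+1) n 1).map (fun j =>
          PySem.List.pyGetD uniq i 0 * PySem.List.pyGetD uniq j 0)))
      (fun x => x) false
    let st := (PySem.List.slice products (some 1) none).foldl
      (fun (st : Int × Int × Int) p =>
        if p = st.2.1 then (st.1, st.2.1, st.2.2 + 1)
        else (st.1 + 4 * st.2.2 * (st.2.2 - 1), p, 1))
      (0, PySem.List.pyGetD products 0 0, 1)
    st.1 + 4 * st.2.2 * (st.2.2 - 1)

-- ===== PRECONDITION & SPEC =====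
def Spec_count_same_product_tuples (integers : List Int) (out : Int) : Prop := out = count_same_product_tuples_alt integers
instance (integers : List Int) (out : Int) : Decidable (Spec_count_same_product_tuples integers out) := by unfold Spec_count_same_product_tuples; infer_instance

-- ===== CLAIM (what is proved, stated in full; the proofs are below) =====
def Claim_equal_count_same_product_tuples : Prop := ∀ (integers : List Int), Dom_count_same_product_tuples integers → Spec_count_same_product_tuples integers (count_same_product_tuples integers)

-- ===== LEMMAS AND PROOFS =====

-- value at an index, A's bucket step, product of a pair, and the i<j pair list in row order
def pvG (l : List Int) (i : Int) : Int := PySem.List.pyGetD l i 0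

def pvStepA (d : PySem.Dict Int (List (Int × Int))) (t : Int × Int) :
    PySem.Dict Int (List (Int × Int)) := d.modify (t.1 * t.2) [] (· ++ [t])

def pvKey (t : Int × Int) : Int := t.1 * t.2

def pvTs (l : List Int) (n : Int) : List (Int × Int) :=
  (PySem.List.pyRange 0 n 1).flatMap
    (fun i => (PySem.List.pyRange (i+1) n 1).map (fun j => (pvG l i, pvG l j)))

-- the pair sequence A's while loop walks, with the same fuel discipline as pvLoopA
def pvPairsF (l : List Int) (n : Int) : Nat → Int → Int → List (Int × Int)
  | 0, _, _ => []
  | fuel+1, s, e =>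
    if e ≥ n then
      if s ≥ e - 1 then []
      else pvPairsF l n fuel (s+1) (s+2)
    else (pvG l s, pvG l e) :: pvPairsF l n fuel s (e+1)

-- per-product contributions: A's branchy formula and the closed form 4c(c-1)
def pvFA (c : Nat) : Int := if c = 2 then 8 else if c > 2 then ((c : Int) - 1) * (c : Int) * 4 else 0

def pvFB (c : Nat) : Int := 4 * (c : Int) * ((c : Int) - 1)

def pvSB (qs : List Int) : Int := ((PySem.Set.ofList qs).map (fun p => pvFB (qs.count p))).sum

-- B's scan step, named for the proofs (identical to the lambda in the port)
def pvStepS (st : Int × Int × Int) (p : Int) : Int × Int × Int :=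
  if p = st.2.1 then (st.1, st.2.1, st.2.2 + 1)
  else (st.1 + 4 * st.2.2 * (st.2.2 - 1), p, 1)

lemma pvFA_eq_pvFB (c : Nat) : pvFA c = pvFB c := by
  unfold pvFA pvFB
  rcases c with _ | _ | c
  · norm_num
  · norm_num
  · by_cases h : c + 1 + 1 = 2
    · rw [if_pos h, h]; norm_num
    · have h2 : c + 1 + 1 > 2 := by omega
      rw [if_neg h, if_pos h2]
      push_cast
      ring

lemma pvStepA_eq (d : PySem.Dict Int (List (Int × Int))) (a b : Int) :
    (if d.contains (a * b) then d else d.insert (a * b) []).modify (a * b) []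
      (· ++ [(a, b)]) = pvStepA d (a, b) := by
  unfold pvStepA
  by_cases h : d.contains (a * b)
  · rw [if_pos h]
  · rw [if_neg h]
    simp only [PySem.Dict.modify]
    rw [PySem.Dict.getD_insert_self, PySem.Dict.insert_insert_self,
      PySem.Dict.getD_of_not_contains d _ (by simpa using h)]

lemma pvLoopA_eq_foldl (l : List Int) (n : Int) :
    ∀ (fuel : Nat) (d : PySem.Dict Int (List (Int × Int))) (cp s e : Int),
      pvLoopA l n fuel d cp s e = (pvPairsF l n fuel s e).foldl pvStepA d := by
  intro fuel
  induction fuel with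
  | zero => intro d cp s e; rfl
  | succ fuel ih =>
    intro d cp s e
    simp only [pvLoopA, pvPairsF]
    by_cases h1 : e ≥ n
    · rw [if_pos h1, if_pos h1]
      by_cases h2 : s ≥ e - 1
      · rw [if_pos h2, if_pos h2]; rfl
      · rw [if_neg h2, if_neg h2]; exact ih d cp (s+1) (s+2)
    · rw [if_neg h1, if_neg h1]
      simp only [show ∀ i : Int, PySem.List.pyGetD l i 0 = pvG l i from fun _ => rfl]
      have hcp : cp + (pvG l s * pvG l e - cp) = pvG l s * pvG l e := by ring
      rw [hcp, List.foldl_cons, pvStepA_eq d (pvG l s) (pvG l e)]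
      exact ih _ _ _ _

lemma pvPairsF_inner (l : List Int) (n : Int) :
    ∀ (k : Nat) (s e : Int) (f : Nat), e + (k : Int) = n →
      pvPairsF l n (k + f) s e =
        ((PySem.List.pyRange e n 1).map (fun j => (pvG l s, pvG l j))) ++ pvPairsF l n f s n := by
  intro k
  induction k with
  | zero =>
    intro s e f he
    have hen : e = n := by push_cast at he; omega
    subst hen
    simp [PySem.List.pyRange_one_eq_nil (le_refl e)]
  | succ k ih =>
    intro s e f he
    have hlt : e < n := by push_cast at he; omega
    have hk : (k + 1) + f = (k + f) + 1 := by omega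
    rw [hk]
    simp only [pvPairsF]
    rw [if_neg (by omega : ¬ e ≥ n)]
    rw [ih s (e+1) f (by push_cast at he ⊢; omega), PySem.List.pyRange_one_cons hlt]
    simp

lemma pvPairsF_full (l : List Int) (n : Int) (hn : 0 ≤ n) :
    ∀ (m : Nat) (s : Int) (fuel : Nat), 0 ≤ s → s + (m : Int) = n →
      m * (n.toNat + 2) ≤ fuel →
      pvPairsF l n fuel s (s+1) =
        (PySem.List.pyRange s n 1).flatMap
          (fun i => (PySem.List.pyRange (i+1) n 1).map (fun j => (pvG l i, pvG l j))) := by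
  intro m
  induction m with
  | zero =>
    intro s fuel hs hsm hfuel
    have hsn : s = n := by push_cast at hsm; omega
    have hr : PySem.List.pyRange s n 1 = [] := PySem.List.pyRange_one_eq_nil (by omega)
    rw [hr]
    cases fuel with
    | zero => rfl
    | succ f =>
      simp only [pvPairsF]
      rw [if_pos (by omega : s + 1 ≥ n), if_pos (by omega : s ≥ s + 1 - 1)]
      rfl
  | succ m ih =>
    intro s fuel hs hsm hfuel
    push_cast at hsm
    have hsn : s < n := by omega
    have hmN' : m + 1 ≤ n.toNat := by omega
    have hm_le : m ≤ m * (n.toNat + 2) := Nat.le_mul_of_pos_right m (by omega)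
    have hexp : (m+1) * (n.toNat + 2) = m * (n.toNat + 2) + (n.toNat + 2) := by ring
    rw [hexp] at hfuel
    generalize hP : m * (n.toNat + 2) = P at hfuel hm_le
    obtain ⟨f', hf'⟩ : ∃ f', fuel = m + (f' + 1) := ⟨fuel - m - 1, by omega⟩
    subst hf'
    rw [pvPairsF_inner l n m s (s+1) (f'+1) (by omega)]
    rw [PySem.List.pyRange_one_cons hsn, List.flatMap_cons]
    simp only [pvPairsF]
    rw [if_pos (le_refl n : n ≥ n)]
    by_cases hm0 : m = 0
    · subst hm0
      rw [if_pos (by omega : s ≥ n - 1)]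
      have hr : PySem.List.pyRange (s+1) n 1 = [] := PySem.List.pyRange_one_eq_nil (by omega)
      rw [hr]
      simp
    · rw [if_neg (by omega : ¬ s ≥ n - 1)]
      rw [show s + 2 = (s + 1) + 1 by ring]
      rw [ih (s+1) f' (by omega) (by omega) (by rw [hP]; omega)]

-- A's counting pass, peeled into a sum of per-bucket contributions
lemma pvFoldCount (vs : List (List (Int × Int))) : ∀ (c : Int),
    vs.foldl (fun count product =>
      if product.length = 2 then count + 8
      else if product.length > 2 then count + ((product.length : Int) - 1) * (product.length : Int) * 4
      else count) c = c + (vs.map (fun v => pvFA v.length)).sum := by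
  induction vs with
  | nil => intro c; simp
  | cons v vs ih =>
    intro c
    simp only [List.foldl_cons, List.map_cons, List.sum_cons, ih]
    unfold pvFA
    split_ifs <;> ring

lemma pvStepA_foldl_keys (ts : List (Int × Int)) :
    (ts.foldl pvStepA PySem.Dict.empty).keys = PySem.Set.ofList (ts.map pvKey) := by
  calc (ts.foldl pvStepA PySem.Dict.empty).keys
      = (ts.foldl (fun d x => d.modify (pvKey x) []
          ((fun (_ : PySem.Dict Int (List (Int × Int))) (t : Int × Int) => (· ++ [t])) d x))
          PySem.Dict.empty).keys := rfl
    _ = PySem.Set.update (PySem.Dict.empty : PySem.Dict Int (List (Int × Int))).keys (ts.map pvKey) :=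
        PySem.Dict.keys_foldl_modify_key ts pvKey [] _ PySem.Dict.empty
    _ = PySem.Set.ofList (ts.map pvKey) := by
        rw [PySem.Dict.keys_empty, PySem.Set.update_nil_left]

lemma pvStepA_foldl_getD (ts : List (Int × Int)) (p : Int) :
    ((ts.foldl pvStepA PySem.Dict.empty).getD p []).length = (ts.map pvKey).count p := by
  calc ((ts.foldl pvStepA PySem.Dict.empty).getD p []).length
      = (((ts.map (fun t => (pvKey t, t))).foldl
          (fun d q => d.modify q.1 [] (· ++ [q.2])) PySem.Dict.empty).getD p []).length := by
        rw [List.foldl_map]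
        rfl
    _ = ((PySem.Dict.empty : PySem.Dict Int (List (Int × Int))).getD p []
          ++ ((ts.map (fun t => (pvKey t, t))).filter (fun q => q.1 == p)).map (·.2)).length := by
        rw [PySem.Dict.getD_foldl_modify_append]
    _ = (ts.map pvKey).count p := by
        simp [List.filter_map, List.count, List.countP_eq_length_filter]
        rfl

lemma pvA_count (ts : List (Int × Int)) :
    ((ts.foldl pvStepA PySem.Dict.empty).values).foldl (fun count product =>
      if product.length = 2 then count + 8
      else if product.length > 2 then count + ((product.length : Int) - 1) * (product.length : Int) * 4
      else count) 0 = pvSB (ts.map pvKey) := by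
  have hkeys := pvStepA_foldl_keys ts
  have hnd : (ts.foldl pvStepA PySem.Dict.empty).keys.Nodup := by
    rw [hkeys]; exact PySem.Set.nodup_ofList (ts.map pvKey)
  rw [PySem.Dict.values_eq_map_keys (ts.foldl pvStepA PySem.Dict.empty) hnd ([] : List (Int × Int)), pvFoldCount, List.map_map, hkeys, zero_add]
  unfold pvSB
  apply congrArg
  apply List.map_congr_left
  intro k hk
  simp only [Function.comp_apply]
  rw [pvStepA_foldl_getD ts k, pvFA_eq_pvFB]

-- ---- B side: the run-length scan of a sorted list computes pvSB ----

lemma pvOfList_replicate (a : Int) : ∀ (r : Nat), PySem.Set.ofList (List.replicate (r+1) a) = [a] := by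
  intro r
  induction r with
  | zero => rfl
  | succ r ih =>
    have h : List.replicate (r+1+1) a = a :: List.replicate (r+1) a := rfl
    rw [h, PySem.Set.ofList_cons, ih]
    simp [PySem.Set.discard]

lemma pvOfList_split (a : Int) (r : Nat) (rest : List Int) (ha : a ∉ rest) :
    PySem.Set.ofList (List.replicate (r+1) a ++ rest) = a :: PySem.Set.ofList rest := by
  rw [PySem.Set.ofList_append, pvOfList_replicate a r,
    PySem.Set.update_eq_append_filter]
  have hfilter : (PySem.Set.ofList rest).filter (fun y => !(PySem.Set.contains [a] y)) =
      PySem.Set.ofList rest := by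
    apply List.filter_eq_self.2
    intro y hy
    have hya : y ≠ a := by
      intro h; subst h; exact ha ((PySem.Set.mem_ofList rest y).1 hy)
    simp [hya]
  rw [hfilter]
  rfl

lemma pvSB_split (a : Int) (r : Nat) (rest : List Int) (ha : a ∉ rest) :
    pvSB (List.replicate (r+1) a ++ rest) = pvFB (r+1) + pvSB rest := by
  unfold pvSB
  rw [pvOfList_split a r rest ha, List.map_cons, List.sum_cons]
  have hca : (List.replicate (r+1) a ++ rest).count a = r+1 := by
    rw [List.count_append, List.count_replicate, List.count_eq_zero.2 ha]
    simp
  rw [hca]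
  congr 1
  refine congrArg _ (List.map_congr_left ?_)
  intro q hq
  have hqr : q ∈ rest := (PySem.Set.mem_ofList rest q).1 hq
  have hqa : q ≠ a := by rintro rfl; exact ha hqr
  rw [List.count_append, List.count_replicate, if_neg (by simpa using Ne.symm hqa)]
  simp

lemma pvScan_eq (tail : List Int) : ∀ (prev total : Int) (r : Nat),
    (List.replicate (r+1) prev ++ tail).Pairwise (· ≤ ·) →
    (tail.foldl pvStepS (total, prev, ((r:Int)+1))).1
      + 4 * (tail.foldl pvStepS (total, prev, ((r:Int)+1))).2.2
        * ((tail.foldl pvStepS (total, prev, ((r:Int)+1))).2.2 - 1)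
      = total + pvSB (List.replicate (r+1) prev ++ tail) := by
  induction tail with
  | nil =>
    intro prev total r hpw
    simp only [List.foldl_nil]
    rw [List.append_nil, show pvSB (List.replicate (r+1) prev) =
      pvSB (List.replicate (r+1) prev ++ []) by rw [List.append_nil],
      pvSB_split prev r [] (List.not_mem_nil)]
    have h0 : pvSB ([] : List Int) = 0 := rfl
    rw [h0]
    unfold pvFB
    push_cast
    ring
  | cons p t ih =>
    intro prev total r hpw
    simp only [List.foldl_cons]
    by_cases hp : p = prev
    · subst hp
      have hlist : List.replicate (r+1) p ++ p :: t = List.replicate (r+1+1) p ++ t := by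
        rw [List.append_cons, ← List.replicate_succ']
      rw [hlist] at hpw ⊢
      have hstep : pvStepS (total, p, ((r:Int)+1)) p = (total, p, ((r:Int)+1)+1) := by
        unfold pvStepS; rw [if_pos rfl]
      rw [hstep, show ((r:Int)+1)+1 = (((r+1:Nat)):Int)+1 by push_cast; ring]
      exact ih p total (r+1) hpw
    · have hstep : pvStepS (total, prev, ((r:Int)+1)) p
          = (total + 4 * ((r:Int)+1) * (((r:Int)+1) - 1), p, 1) := by
        unfold pvStepS; rw [if_neg hp]
      rw [hstep]
      have hpw' := (List.pairwise_append.1 hpw)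
      have hpt : (p :: t).Pairwise (· ≤ ·) := hpw'.2.1
      have hprev_le : ∀ b ∈ p :: t, prev ≤ b := by
        intro b hb
        exact hpw'.2.2 prev (List.mem_replicate.2 ⟨by omega, rfl⟩) b hb
      have hnot : prev ∉ p :: t := by
        intro hmem
        rcases List.mem_cons.1 hmem with h | h
        · exact hp h.symm
        · have h1 : p ≤ prev := List.rel_of_pairwise_cons hpt h
          have h2 : prev ≤ p := hprev_le p List.mem_cons_self
          exact hp (le_antisymm h1 h2)
      have hpw1 : (List.replicate (0+1) p ++ t).Pairwise (· ≤ ·) := by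
        simpa using hpt
      have := ih p (total + 4 * ((r:Int)+1) * (((r:Int)+1) - 1)) 0 hpw1
      rw [show ((0:Nat):Int)+1 = (1:Int) by norm_num] at this
      rw [this]
      rw [pvSB_split prev r (p :: t) hnot]
      have hrepl1 : List.replicate (0+1) p ++ t = p :: t := by simp
      rw [hrepl1]
      unfold pvFB
      push_cast
      ring

lemma pvSB_perm (qs qs' : List Int) (h : qs.Perm qs') : pvSB qs = pvSB qs' := by
  unfold pvSB
  have hmemeq : ∀ a, a ∈ PySem.Set.ofList qs ↔ a ∈ PySem.Set.ofList qs' := by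
    intro a
    rw [PySem.Set.mem_ofList, PySem.Set.mem_ofList]
    exact ⟨fun ha => h.mem_iff.1 ha, fun ha => h.mem_iff.2 ha⟩
  have hperm : (PySem.Set.ofList qs).Perm (PySem.Set.ofList qs') :=
    (List.perm_ext_iff_of_nodup (PySem.Set.nodup_ofList qs) (PySem.Set.nodup_ofList qs')).2 hmemeq
  have hfun : (PySem.Set.ofList qs).map (fun p => pvFB (qs.count p))
      = (PySem.Set.ofList qs).map (fun p => pvFB (qs'.count p)) := by
    apply List.map_congr_left
    intro p _
    rw [h.count_eq]
  rw [hfun]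
  exact (hperm.map (fun p => pvFB (qs'.count p))).sum_eq

-- ===== VERDICT (by name: the statement is the Claim_ definition above) =====
theorem count_same_product_tuples_spec : Claim_equal_count_same_product_tuples := by
  intro integers _
  unfold Spec_count_same_product_tuples
  simp only [count_same_product_tuples, count_same_product_tuples_alt]
  by_cases h4 : ((PySem.Set.ofList integers).length : Int) < 4
  · rw [if_pos h4, if_pos h4]
  · rw [if_neg h4, if_neg h4]
    set l : List Int := PySem.Set.ofList integers with hl
    set n : Int := (l.length : Int) with hn
    -- A's side: dict of buckets = fold over the pair list, then pvSB of the products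
    have hfull := pvPairsF_full l n (Int.natCast_nonneg _) l.length 0
      (l.length * (l.length + 2)) (le_refl 0) (by simp [hn]) (by simp [hn])
    have hfull' : pvPairsF l n (l.length * (l.length + 2)) 0 1 = pvTs l n := by
      rw [show (1 : Int) = 0 + 1 by norm_num]
      exact hfull
    rw [pvLoopA_eq_foldl, hfull', pvA_count]
    -- B's side: the products list is (pvTs l n).map pvKey
    have hqs : (PySem.List.pyRange 0 n 1).flatMap (fun i =>
        (PySem.List.pyRange (i+1) n 1).map (fun j =>
          PySem.List.pyGetD l i 0 * PySem.List.pyGetD l j 0)) = (pvTs l n).map pvKey := by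
      rw [pvTs, List.map_flatMap]
      apply List.flatMap_congr
      intro i _
      rw [List.map_map]
      rfl
    rw [hqs]
    set qs : List Int := (pvTs l n).map pvKey with hqsdef
    -- qs is nonempty since n ≥ 4
    have hn4 : (4:Int) ≤ n := by omega
    have hqs_ne : qs ≠ [] := by
      rw [hqsdef, pvTs, PySem.List.pyRange_one_cons (by omega : (0:Int) < n),
        List.flatMap_cons, PySem.List.pyRange_one_cons (by omega : (0:Int)+1 < n)]
      simp
    set ps : List Int := PySem.List.sorted qs (fun x => x) false with hps
    have hps_ne : ps ≠ [] := by
      rw [hps]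
      intro h
      exact hqs_ne ((PySem.List.sorted_eq_nil_iff qs (fun x => x) false).1 h)
    obtain ⟨h0, t0, hcons⟩ := List.exists_cons_of_ne_nil hps_ne
    have hpw : ps.Pairwise (· ≤ ·) := PySem.List.sorted_pairwise qs (fun x => x)
    have hperm : ps.Perm qs := PySem.List.sorted_perm qs (fun x => x) false
    rw [hcons] at hpw hperm
    have hpw1 : (List.replicate (0+1) h0 ++ t0).Pairwise (· ≤ ·) := by simpa using hpw
    have hscan := pvScan_eq t0 h0 0 0 hpw1
    rw [show ((0:Nat):Int)+1 = (1:Int) by norm_num] at hscan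
    have hslice : PySem.List.slice ps (some 1) none = t0 := by
      rw [hcons, PySem.List.slice_from_one]; rfl
    have hget : PySem.List.pyGetD ps 0 0 = h0 := by
      rw [hcons, PySem.List.pyGetD_zero_cons]
    rw [hslice, hget]
    have hBsteps : (fun (st : Int × Int × Int) p =>
        if p = st.2.1 then (st.1, st.2.1, st.2.2 + 1)
        else (st.1 + 4 * st.2.2 * (st.2.2 - 1), p, 1)) = pvStepS := by
      funext st p; rfl
    rw [hBsteps]
    have hfin : pvSB (List.replicate (0+1) h0 ++ t0) = pvSB qs := by
      have : List.replicate (0+1) h0 ++ t0 = h0 :: t0 := by simp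
      rw [this]
      exact pvSB_perm _ _ hperm
    rw [hscan, hfin]
    ring
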